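-- pv_equiv track=rewrite | github.com/Trnguyn/BTC- | Python/EMIRP number.py | find_emirp
-- ===== SOURCE A (Python) =====
-- def is_prime(n):
--     if n < 2:
--         return False
--     for i in range(2, int(n**0.5) + 1):
--         if n % i == 0:
--             return False
--     return True
--
-- def reversed_number(n):
--     return int(str(n)[::-1])
--
-- def find_emirp(n):
--     emirp_pairs = []
--     checked = set()
--     for num in range(2, n):
--         reversed_num = reversed_number(num)
--         if num not in checked and reversed_num not in checked and is_prime(num) and is_prime(reversed_num) and reversed_num != num and reversed_num < n:
--             emirp_pairs.append((num, reversed_num))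
--             checked.add(num)
--             checked.add(reversed_num)
--     return emirp_pairs
-- ===== SOURCE B (Python) =====
-- def find_emirp(n):
--     # Sieve of Eratosthenes replaces per-number trial division; the pairing
--     # loop then only does set-membership tests.
--     emirp_pairs = []
--     if n <= 2:
--         return emirp_pairs
--     sieve = [True] * n
--     sieve[0] = False
--     sieve[1] = False
--     p = 2
--     while p * p < n:
--         if sieve[p]:
--             for m in range(p * p, n, p):
--                 sieve[m] = False
--         p += 1
--     primes = {i for i in range(2, n) if sieve[i]}
--     checked = set()
--     for num in range(2, n):
--         r = int(str(num)[::-1])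
--         if num not in checked and r not in checked and num in primes and r in primes and r != num:
--             emirp_pairs.append((num, r))
--             checked.add(num)
--             checked.add(r)
--     return emirp_pairs
-- ===== Notes on version B (the rewrite author's own statement) =====
-- stated objective: faster
-- what changed: Primality below n is precomputed once with a Sieve of Eratosthenes and collected into a prime set, so the pairing loop does set-membership tests instead of calling trial-division is_prime on each number and its reversal.
import Mathlib
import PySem

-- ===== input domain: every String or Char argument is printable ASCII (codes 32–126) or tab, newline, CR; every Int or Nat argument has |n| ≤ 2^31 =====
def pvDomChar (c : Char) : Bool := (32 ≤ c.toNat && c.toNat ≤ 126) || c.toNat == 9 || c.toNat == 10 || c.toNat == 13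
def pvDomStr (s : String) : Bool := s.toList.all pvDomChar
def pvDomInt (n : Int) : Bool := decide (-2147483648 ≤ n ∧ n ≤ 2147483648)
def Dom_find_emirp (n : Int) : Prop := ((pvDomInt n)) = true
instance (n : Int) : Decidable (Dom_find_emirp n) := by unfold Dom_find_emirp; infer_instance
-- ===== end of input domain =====

-- B precomputes primality once with a Sieve of Eratosthenes instead of trial division per number (objective: faster).

-- ===== PORT A =====
-- int(n**0.5) is ported as Nat.sqrt: floor(float sqrt) equals the integer square root for the
-- magnitudes reachable here (arguments < 2^31, digit reversals < 2^34), where the correctly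
-- rounded double sqrt cannot cross an integer boundary.
def is_prime (n : Int) : Bool :=
  if n < 2 then false
  else
    (PySem.List.pyRange 2 (((Nat.sqrt n.toNat : Nat) : Int) + 1) 1).all
      (fun i => !(PySem.Int.mod n i == 0))

-- int(str(n)[::-1]); the fallback 0 branches are unreachable here (find_emirp calls this with
-- num ≥ 2, where str(num)[::-1] is a nonempty digit string, so both Options are some)
def reversed_number (n : Int) : Int :=
  match PySem.Str.slice? (PySem.Int.toStr n) none none (-1) with
  | some s => (PySem.Int.ofStr? s).getD 0
  | none => 0

def find_emirp (n : Int) : List (Int × Int) :=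
  let res := (PySem.List.pyRange 2 n 1).foldl
    (fun (st : List (Int × Int) × PySem.Set Int) num =>
      let reversed_num := reversed_number num
      if !(PySem.Set.contains st.2 num) && !(PySem.Set.contains st.2 reversed_num)
          && is_prime num && is_prime reversed_num
          && !(reversed_num == num) && decide (reversed_num < n)
      then (st.1 ++ [(num, reversed_num)], PySem.Set.add (PySem.Set.add st.2 num) reversed_num)
      else st)
    ([], PySem.Set.empty)
  res.1

-- ===== PORT B =====
-- Source B's inline int(str(num)[::-1]) (same unreachable fallback as above)
def rev_int (num : Int) : Int :=
  match PySem.Str.slice? (PySem.Int.toStr num) none none (-1) with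
  | some s => (PySem.Int.ofStr? s).getD 0
  | none => 0

-- for m in range(p*p, n, p): sieve[m] = False
def sieveMark (s : List Bool) (p n : Int) : List Bool :=
  (PySem.List.pyRange (p * p) n p).foldl (fun acc m => PySem.List.pySetD acc m false) s

-- while p*p < n: if sieve[p]: mark multiples; p += 1
def sieveLoop (n p : Int) (s : List Bool) : List Bool :=
  if p * p < n then
    sieveLoop n (p + 1) (if PySem.List.pyGetD s p false then sieveMark s p n else s)
  else s
termination_by (n - p).toNat
decreasing_by
  rename_i h
  have h1 : 2 * p - 1 ≤ p * p := by nlinarith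
  have h2 : 0 ≤ p * p := mul_self_nonneg p
  omega

def find_emirp_alt (n : Int) : List (Int × Int) :=
  if n ≤ 2 then []
  else
    let sieve0 := PySem.List.pySetD (PySem.List.pySetD (List.replicate n.toNat true) 0 false) 1 false
    let sieve := sieveLoop n 2 sieve0
    let primes : PySem.Set Int :=
      PySem.Set.ofList ((PySem.List.pyRange 2 n 1).filter (fun i => PySem.List.pyGetD sieve i false))
    let res := (PySem.List.pyRange 2 n 1).foldl
      (fun (st : List (Int × Int) × PySem.Set Int) num =>
        let r := rev_int num
        if !(PySem.Set.contains st.2 num) && !(PySem.Set.contains st.2 r)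
            && PySem.Set.contains primes num && PySem.Set.contains primes r
            && !(r == num)
        then (st.1 ++ [(num, r)], PySem.Set.add (PySem.Set.add st.2 num) r)
        else st)
      ([], PySem.Set.empty)
    res.1

-- ===== PRECONDITION & SPEC =====
def Spec_find_emirp (n : Int) (out : List (Int × Int)) : Prop := out = find_emirp_alt n
instance (n : Int) (out : List (Int × Int)) : Decidable (Spec_find_emirp n out) := by unfold Spec_find_emirp; infer_instance

-- ===== CLAIM (what is proved, stated in full; the proofs are below) =====
def Claim_equal_find_emirp : Prop := ∀ (n : Int), Dom_find_emirp n → Spec_find_emirp n (find_emirp n)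

-- ===== LEMMAS AND PROOFS =====

-- "i has no divisor d with 2 ≤ d, d < P, d*d ≤ i": what the first P-2 sieve rounds have excluded
def NoDivBelow (P i : Nat) : Prop := ∀ d : Nat, 2 ≤ d → d < P → d * d ≤ i → ¬ d ∣ i
-- "i has no divisor d with 2 ≤ d, d*d ≤ i": what trial division up to the square root checks
def TrialFree (i : Nat) : Prop := ∀ d : Nat, 2 ≤ d → d * d ≤ i → ¬ d ∣ i
lemma length_markFold (L : List Int) (s : List Bool) :
    (L.foldl (fun acc m => PySem.List.pySetD acc m false) s).length = s.length := by
  induction L generalizing s with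
  | nil => rfl
  | cons m t ih => simp [List.foldl, ih, PySem.List.length_pySetD]

lemma getElem_markFold (L : List Int) (hm : ∀ m ∈ L, 0 ≤ m) (s : List Bool) (i : Nat)
    (hi : i < s.length) (hi' : i < (L.foldl (fun acc m => PySem.List.pySetD acc m false) s).length) :
    (L.foldl (fun acc m => PySem.List.pySetD acc m false) s)[i] =
      if ((i : Int) ∈ L) then false else s[i] := by
  induction L generalizing s with
  | nil => simp
  | cons m t ih =>
    have hm0 : 0 ≤ m := hm m (by simp)
    have hset : PySem.List.pySetD s m false = s.set m.toNat false :=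
      PySem.List.pySetD_of_nonneg s false hm0
    have := ih (fun x hx => hm x (by simp [hx])) (s.set m.toNat false) (by simpa using hi)
      (by simpa [List.foldl, hset] using hi')
    simp only [List.foldl, hset] at hi' ⊢
    rw [this]
    by_cases hit : (i : Int) ∈ t
    · simp [hit]
    · by_cases him : (i : Int) = m
      · have : m.toNat = i := by omega
        simp [him, this]
      · have : m.toNat ≠ i := by omega
        simp [hit, him, this]

lemma length_sieveLoop (n p : Int) (s : List Bool) : (sieveLoop n p s).length = s.length := by
  unfold sieveLoop
  split
  · rw [length_sieveLoop]
    split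
    · exact length_markFold _ _
    · rfl
  · rfl
termination_by (n - p).toNat
decreasing_by
  have h1 : 2 * p - 1 ≤ p * p := by nlinarith
  have h2 : 0 ≤ p * p := mul_self_nonneg p
  omega

lemma sieveLoop_getElem (n p : Int) (hp : 2 ≤ p) (s : List Bool) (hlen : (s.length : Int) = n)
    (hs : ∀ i : Nat, (h : i < s.length) → (s[i] = true ↔ (2 ≤ i ∧ NoDivBelow p.toNat i)))
    (i : Nat) (h1 : i < (sieveLoop n p s).length) (h2 : i < s.length) :
    (sieveLoop n p s)[i] = true ↔ (2 ≤ i ∧ TrialFree i) := by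
  unfold sieveLoop
  split
  · rename_i hpn
    have hpltn : p < n := by nlinarith
    have hplen : p.toNat < s.length := by omega
    have hget : PySem.List.pyGetD s p false = s[p.toNat] :=
      PySem.List.pyGetD_eq_getElem s false (by omega) (by omega)
    have hptn : (p + 1).toNat = p.toNat + 1 := by omega
    have hp2 : 2 ≤ p.toNat := by omega
    have hcast : ((p.toNat : Int)) = p := by omega
    by_cases hsp : PySem.List.pyGetD s p false = true
    · -- sieve[p] true: mark multiples of p starting at p*p
      have hmL : ∀ m ∈ PySem.List.pyRange (p * p) n p, 0 ≤ m := by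
        intro m hm
        rw [PySem.List.mem_pyRange_iff_of_pos (by omega)] at hm
        nlinarith [hm.1]
      have hlenM : (sieveMark s p n).length = s.length := length_markFold _ _
      have hmem : ∀ j : Nat, j < s.length →
          (((j : Int) ∈ PySem.List.pyRange (p * p) n p) ↔ (p.toNat * p.toNat ≤ j ∧ p.toNat ∣ j)) := by
        intro j hjs
        have hjn : (j : Int) < n := by omega
        rw [PySem.List.mem_pyRange_iff_of_pos (by omega)]
        constructor
        · rintro ⟨hle, -, hdvd⟩
          have hdj : p ∣ (j : Int) := by
            have h' := dvd_add hdvd (dvd_mul_left p p)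
            simpa using h'
          constructor
          · have : ((p.toNat * p.toNat : Nat) : Int) ≤ (j : Int) := by push_cast [hcast]; exact hle
            exact_mod_cast this
          · have : (p.toNat : Int) ∣ (j : Int) := by rwa [hcast]
            exact_mod_cast this
        · rintro ⟨hle, hdvd⟩
          have hle' : p * p ≤ (j : Int) := by
            have : ((p.toNat * p.toNat : Nat) : Int) ≤ (j : Int) := by exact_mod_cast hle
            push_cast [hcast] at this; exact this
          have hdvd' : p ∣ (j : Int) := by
            have : (p.toNat : Int) ∣ (j : Int) := by exact_mod_cast hdvd
            rwa [hcast] at this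
          exact ⟨hle', hjn, hdvd'.sub (dvd_mul_left p p)⟩
      have hinv : ∀ j : Nat, (h : j < (sieveMark s p n).length) →
          ((sieveMark s p n)[j] = true ↔ (2 ≤ j ∧ NoDivBelow (p+1).toNat j)) := by
        intro j hj
        have hjs : j < s.length := by omega
        rw [hptn]
        have hmark : (sieveMark s p n)[j]
            = if ((j : Int) ∈ PySem.List.pyRange (p * p) n p) then false else s[j] :=
          getElem_markFold _ hmL s j hjs (by simpa [sieveMark, length_markFold] using hj)
        rw [hmark]
        by_cases hin : (j : Int) ∈ PySem.List.pyRange (p * p) n p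
        · simp only [hin, if_true]
          rw [hmem j hjs] at hin
          constructor
          · intro hff; simp at hff
          · rintro ⟨hj2, hnd⟩
            exact absurd hin.2 (hnd p.toNat hp2 (by omega) hin.1)
        · simp only [hin, if_false]
          rw [hs j hjs]
          rw [hmem j hjs] at hin
          constructor
          · rintro ⟨hj2, hnd⟩
            refine ⟨hj2, fun d hd2 hdlt hdd hdvd => ?_⟩
            rcases Nat.lt_succ_iff_lt_or_eq.mp hdlt with h | h
            · exact hnd d hd2 h hdd hdvd
            · subst h; exact hin ⟨hdd, hdvd⟩
          · rintro ⟨hj2, hnd⟩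
            exact ⟨hj2, fun d hd2 hdlt hdd hdvd => hnd d hd2 (by omega) hdd hdvd⟩
      have hrec := sieveLoop_getElem n (p + 1) (by omega) (sieveMark s p n)
        (by rw [hlenM]; exact hlen) hinv i
        (by rw [length_sieveLoop, hlenM]; exact h2) (by omega)
      simpa [hsp] using hrec
    · -- sieve[p] false: p composite, sieve unchanged
      have hspf : s[p.toNat] = false := by
        cases hf : s[p.toNat]
        · rfl
        · exact absurd (hget.trans hf) hsp
      have hex : ∃ q : Nat, 2 ≤ q ∧ q < p.toNat ∧ q * q ≤ p.toNat ∧ q ∣ p.toNat := by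
        by_contra hno
        push Not at hno
        have : s[p.toNat] = true := (hs p.toNat hplen).mpr
          ⟨hp2, fun d hd2 hdlt hdd hdvd => hno d hd2 hdlt hdd hdvd⟩
        rw [hspf] at this; exact absurd this (by simp)
      obtain ⟨q, hq2, hqlt, hqq, hqdvd⟩ := hex
      have hinv : ∀ j : Nat, (h : j < s.length) →
          (s[j] = true ↔ (2 ≤ j ∧ NoDivBelow (p+1).toNat j)) := by
        intro j hj
        rw [hptn, hs j hj]
        constructor
        · rintro ⟨hj2, hnd⟩
          refine ⟨hj2, fun d hd2 hdlt hdd hdvd => ?_⟩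
          rcases Nat.lt_succ_iff_lt_or_eq.mp hdlt with h | h
          · exact hnd d hd2 h hdd hdvd
          · subst h
            have hqq' : q * q ≤ j := by
              have hpp : p.toNat ≤ p.toNat * p.toNat := Nat.le_mul_of_pos_left _ (by omega)
              omega
            exact hnd q hq2 hqlt hqq' (hqdvd.trans hdvd)
        · rintro ⟨hj2, hnd⟩
          exact ⟨hj2, fun d hd2 hdlt hdd hdvd => hnd d hd2 (by omega) hdd hdvd⟩
      have hrec := sieveLoop_getElem n (p + 1) (by omega) s hlen hinv i
        (by rw [length_sieveLoop]; exact h2) h2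
      simpa [hsp] using hrec
  · rename_i hpn
    push Not at hpn
    rw [hs i h2]
    have hiltn : (i : Int) < n := by omega
    constructor
    · rintro ⟨hj2, hnd⟩
      refine ⟨hj2, fun d hd2 hdd hdvd => ?_⟩
      have hdp : d < p.toNat := by
        by_contra hge
        push Not at hge
        have hc : ((p.toNat : Int)) = p := by omega
        have h1' : (p : Int) ≤ (d : Nat) := by rw [← hc]; exact_mod_cast hge
        have hdd' : ((d * d : Nat) : Int) ≤ (i : Int) := by exact_mod_cast hdd
        push_cast at hdd'
        nlinarith
      exact hnd d hd2 hdp hdd hdvd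
    · rintro ⟨hj2, hnd⟩
      exact ⟨hj2, fun d hd2 _ hdd hdvd => hnd d hd2 hdd hdvd⟩
termination_by (n - p).toNat
decreasing_by
  all_goals
    have h1 : 2 * p - 1 ≤ p * p := by nlinarith
    have h2 : 0 ≤ p * p := mul_self_nonneg p
    omega
lemma is_prime_iff (x : Int) : is_prime x = true ↔ (2 ≤ x ∧ TrialFree x.toNat) := by
  unfold is_prime
  by_cases hx : x < 2
  · simp [hx]
  · push Not at hx
    have hx0 : (x.toNat : Int) = x := Int.toNat_of_nonneg (by omega)
    simp only [if_neg (by omega : ¬ x < 2), List.all_eq_true]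
    constructor
    · intro hall
      refine ⟨hx, fun d hd2 hdd hdvd => ?_⟩
      have hmem : (d : Int) ∈ PySem.List.pyRange 2 (((Nat.sqrt x.toNat : Nat) : Int) + 1) 1 := by
        rw [PySem.List.mem_pyRange_one]
        have : d ≤ Nat.sqrt x.toNat := Nat.le_sqrt.mpr hdd
        omega
      have := hall _ hmem
      simp only [Bool.not_eq_eq_eq_not, Bool.not_true, beq_eq_false_iff_ne, ne_eq] at this
      rw [PySem.Int.mod_eq_zero_iff_dvd] at this
      exact this (by exact_mod_cast (hx0 ▸ Int.natCast_dvd_natCast.mpr hdvd))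
    · rintro ⟨-, htf⟩ i hi
      rw [PySem.List.mem_pyRange_one] at hi
      simp only [Bool.not_eq_eq_eq_not, Bool.not_true, beq_eq_false_iff_ne, ne_eq]
      rw [PySem.Int.mod_eq_zero_iff_dvd]
      intro hdvd
      have h2 : 2 ≤ i.toNat := by omega
      have hle : i.toNat ≤ Nat.sqrt x.toNat := by omega
      have hsq : i.toNat * i.toNat ≤ x.toNat := Nat.le_sqrt.mp hle
      apply htf i.toNat h2 hsq
      have : (i.toNat : Int) ∣ (x.toNat : Int) := by
        rw [hx0]
        rwa [Int.toNat_of_nonneg (by omega : (0:Int) ≤ i)]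
      exact_mod_cast this
lemma sieve0_spec (n : Int) :
    let s0 := PySem.List.pySetD (PySem.List.pySetD (List.replicate n.toNat true) 0 false) 1 false
    s0.length = n.toNat ∧ ∀ i : Nat, (h : i < s0.length) → (s0[i] = true ↔ 2 ≤ i) := by
  intro s0
  have h0 : PySem.List.pySetD (List.replicate n.toNat true) 0 false
      = (List.replicate n.toNat true).set 0 false :=
    PySem.List.pySetD_of_nonneg _ _ (by norm_num)
  have h1 : s0 = ((List.replicate n.toNat true).set 0 false).set 1 false := by
    show PySem.List.pySetD _ 1 false = _
    rw [h0, PySem.List.pySetD_of_nonneg _ _ (by norm_num)]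
    rfl
  constructor
  · simp [h1]
  · intro i h
    simp only [h1, List.getElem_set, List.getElem_replicate]
    split_ifs <;> simp <;> omega

lemma sieve_lookup (n : Int) (hn : 2 < n) (x : Int) (hx2 : 2 ≤ x) (hxn : x < n) :
    PySem.List.pyGetD
      (sieveLoop n 2 (PySem.List.pySetD (PySem.List.pySetD (List.replicate n.toNat true) 0 false) 1 false))
      x false = is_prime x := by
  obtain ⟨hl0, hg0⟩ := sieve0_spec n
  set s0 := PySem.List.pySetD (PySem.List.pySetD (List.replicate n.toNat true) 0 false) 1 false with hs0
  have hlenS : (sieveLoop n 2 s0).length = n.toNat := by rw [length_sieveLoop]; exact hl0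
  have hget : PySem.List.pyGetD (sieveLoop n 2 s0) x false = (sieveLoop n 2 s0)[x.toNat]'(by omega) :=
    PySem.List.pyGetD_eq_getElem _ _ (by omega) (by omega)
  have hbase : ∀ i : Nat, (h : i < s0.length) → (s0[i] = true ↔ (2 ≤ i ∧ NoDivBelow (2:Int).toNat i)) := by
    intro i h
    rw [hg0 i h]
    constructor
    · intro h2
      exact ⟨h2, fun d hd2 hdlt _ _ => by omega⟩
    · rintro ⟨h2, -⟩
      exact h2
  have hch := sieveLoop_getElem n 2 le_rfl s0 (by omega) hbase x.toNat (by omega) (by omega)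
  rw [hget, Bool.eq_iff_iff, hch, is_prime_iff]
  constructor
  · rintro ⟨-, h⟩; exact ⟨hx2, h⟩
  · rintro ⟨-, h⟩; exact ⟨by omega, h⟩

lemma primes_contains (n : Int) (hn : 2 < n) (x : Int) :
    PySem.Set.contains
      (PySem.Set.ofList ((PySem.List.pyRange 2 n 1).filter
        (fun i => PySem.List.pyGetD
          (sieveLoop n 2 (PySem.List.pySetD (PySem.List.pySetD (List.replicate n.toNat true) 0 false) 1 false))
          i false)))
      x
    = (is_prime x && decide (x < n)) := by
  rw [Bool.eq_iff_iff, PySem.Set.contains_iff, PySem.Set.mem_ofList, List.mem_filter,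
    PySem.List.mem_pyRange_one]
  simp only [Bool.and_eq_true, decide_eq_true_eq]
  constructor
  · rintro ⟨⟨h2, hlt⟩, hget⟩
    refine ⟨?_, hlt⟩
    rw [← sieve_lookup n hn x h2 hlt]
    exact hget
  · rintro ⟨hip, hlt⟩
    have h2 : 2 ≤ x := ((is_prime_iff x).mp hip).1
    exact ⟨⟨h2, hlt⟩, by rw [sieve_lookup n hn x h2 hlt]; exact hip⟩

theorem find_emirp_spec : Claim_equal_find_emirp := by
  intro n _
  show find_emirp n = find_emirp_alt n
  by_cases hn : n ≤ 2
  · rw [find_emirp, find_emirp_alt, if_pos hn, PySem.List.pyRange_one_eq_nil hn]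
    rfl
  · push Not at hn
    simp only [find_emirp, find_emirp_alt, if_neg (by omega : ¬ n ≤ 2)]
    congr 1
    apply PySem.List.foldl_congr_mem'
    intro num hmem st
    rw [PySem.List.mem_pyRange_one] at hmem
    have hrev : rev_int num = reversed_number num := rfl
    have htn : decide (num < n) = true := decide_eq_true hmem.2
    simp only [hrev, primes_contains n hn, htn, Bool.and_true]
    have hb : ∀ (u P Q e t : Bool),
        (((u && P) && (Q && t)) && e) = ((((u && P) && Q) && e) && t) := by decide
    rw [hb]
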